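-- pv_equiv track=rewrite | github.com/gionuno/admm_sparse_hierarchical | admm.py | get_tidx
-- ===== SOURCE A (Python) =====
-- def get_tidx(t_dim):
--     t_idx = (len(t_dim)+1)*[0];
--     t_idx[0] = 1;
--     for d in range(1,len(t_idx)):
--         p = 1;
--         for e in range(d):
--             p *= t_dim[e];
--         t_idx[d] = t_idx[d-1] + p;
--     return t_idx;
-- ===== SOURCE B (Python) =====
-- def get_tidx(t_dim):
--     out = [1]
--     p = 1
--     s = 1
--     for x in t_dim:
--         p *= x
--         s += p
--         out.append(s)
--     return out
-- ===== Notes on version B (the rewrite author's own statement) =====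
-- stated objective: faster
-- what changed: replace the nested loop that recomputes each prefix product from scratch with a single pass that maintains a running prefix product and running sum
import Mathlib
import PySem

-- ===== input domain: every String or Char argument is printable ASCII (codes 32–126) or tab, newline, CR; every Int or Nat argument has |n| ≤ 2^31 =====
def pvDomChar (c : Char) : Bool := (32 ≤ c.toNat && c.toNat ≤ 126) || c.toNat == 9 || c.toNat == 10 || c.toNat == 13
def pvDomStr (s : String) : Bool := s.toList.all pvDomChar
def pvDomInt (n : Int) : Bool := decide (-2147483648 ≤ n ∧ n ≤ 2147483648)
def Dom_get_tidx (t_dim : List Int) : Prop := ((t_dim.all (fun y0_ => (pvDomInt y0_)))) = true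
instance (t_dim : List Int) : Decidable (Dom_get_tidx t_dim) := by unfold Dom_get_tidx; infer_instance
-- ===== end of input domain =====

-- B replaces A's nested recomputation of each prefix product by one pass
-- maintaining a running prefix product and running sum (objective: faster).

-- ===== PORT A =====
-- literal transliteration of A: allocate zeros, set index 0, and for each d
-- recompute the product of t_dim[0:d] with an inner loop, writing into the list
def get_tidx (t_dim : List Int) : List Int :=
  let t_idx := (List.replicate (t_dim.length + 1) (0 : Int)).set 0 1
  (List.range' 1 t_dim.length).foldl
    (fun acc d =>
      let p := (List.range d).foldl
        (fun p (e : Nat) => p * ((PySem.List.pyGet? t_dim (e : Int)).getD 0)) 1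
      acc.set d (((PySem.List.pyGet? acc ((d : Int) - 1)).getD 0) + p))
    t_idx

-- ===== PORT B =====
-- transliteration of Source B's loop body: p *= x; s += p; out.append(s)
def get_tidx_goB (xs : List Int) (p s : Int) : List Int :=
  match xs with
  | [] => []
  | x :: rest =>
    let p' := p * x
    let s' := s + p'
    s' :: get_tidx_goB rest p' s'

def get_tidx_alt (t_dim : List Int) : List Int :=
  1 :: get_tidx_goB t_dim 1 1

-- ===== PRECONDITION & SPEC =====
def Spec_get_tidx (t_dim : List Int) (out : List Int) : Prop := out = get_tidx_alt t_dim
instance (t_dim : List Int) (out : List Int) : Decidable (Spec_get_tidx t_dim out) := by unfold Spec_get_tidx; infer_instance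

-- ===== CLAIM (what is proved, stated in full; the proofs are below) =====
def Claim_equal_get_tidx : Prop := ∀ (t_dim : List Int), Dom_get_tidx t_dim → Spec_get_tidx t_dim (get_tidx t_dim)

-- ===== LEMMAS AND PROOFS =====

-- product of the first k elements of t
def pvP (t : List Int) (k : Nat) : Int := (t.take k).foldl (· * ·) 1

-- the mathematical value at index d of the result
def pvS (t : List Int) : Nat → Int
  | 0 => 1
  | d + 1 => pvS t d + pvP t (d + 1)

theorem pvP_succ (t : List Int) (d : Nat) (h : d < t.length) :
    pvP t (d + 1) = pvP t d * t[d] := by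
  unfold pvP
  rw [List.take_add_one, List.getElem?_eq_getElem h, Option.toList_some, List.foldl_append]
  rfl

theorem goB_spec (t : List Int) :
    ∀ k d, t.length - d = k →
      get_tidx_goB (t.drop d) (pvP t d) (pvS t d) =
        (List.range' (d + 1) (t.length - d)).map (pvS t) := by
  intro k
  induction k with
  | zero =>
    intro d hd
    have : t.length ≤ d := by omega
    simp [List.drop_eq_nil_of_le this, hd, get_tidx_goB]
  | succ k ih =>
    intro d hd
    have hlt : d < t.length := by omega
    rw [List.drop_eq_getElem_cons hlt]
    rw [get_tidx_goB]
    have hp : pvP t d * t[d] = pvP t (d + 1) := (pvP_succ t d hlt).symm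
    have hs : pvS t d + pvP t (d + 1) = pvS t (d + 1) := rfl
    have hk : t.length - (d + 1) = k := by omega
    have hih := ih (d + 1) hk
    rw [hd, List.range'_succ, List.map_cons]
    simp only [hp]
    rw [hs, hih, hk]

theorem alt_eq_map (t : List Int) :
    get_tidx_alt t = (List.range' 0 (t.length + 1)).map (pvS t) := by
  have h := goB_spec t t.length 0 (by omega)
  simp only [List.drop_zero, Nat.sub_zero] at h
  have h0 : get_tidx_goB t 1 1 = (List.range' (0 + 1) t.length).map (pvS t) := by
    simpa [pvP, pvS] using h
  rw [List.range'_succ, List.map_cons, get_tidx_alt, h0]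
  rfl

theorem inner_prod (t : List Int) (d : Nat) (hd : d ≤ t.length) :
    (List.range d).foldl
      (fun p (e : Nat) => p * ((PySem.List.pyGet? t (e : Int)).getD 0)) 1 = pvP t d := by
  induction d with
  | zero => simp [pvP]
  | succ d ih =>
    have hlt : d < t.length := by omega
    rw [List.range_succ, List.foldl_append, ih (by omega)]
    simp [PySem.List.pyGet?_natCast, List.getElem?_eq_getElem hlt, pvP_succ t d hlt]

theorem prefix_get (t : List Int) (m : Nat) (tail : List Int) :
    (((List.range' 0 (m + 1)).map (pvS t) ++ tail))[m]? = some (pvS t m) := by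
  rw [List.getElem?_append_left (by simp)]
  simp

theorem set_at_prefix (as : List Int) (b : Int) (bs : List Int) (v : Int) (n : Nat)
    (h : n = as.length) : (as ++ b :: bs).set n v = as ++ v :: bs := by
  subst h
  induction as with
  | nil => simp
  | cons a as ih => simp [ih]

theorem A_inv (t : List Int) :
    ∀ m, m ≤ t.length →
      (List.range' 1 m).foldl
        (fun acc d =>
          let p := (List.range d).foldl
            (fun p (e : Nat) => p * ((PySem.List.pyGet? t (e : Int)).getD 0)) 1
          acc.set d (((PySem.List.pyGet? acc ((d : Int) - 1)).getD 0) + p))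
        ((List.replicate (t.length + 1) (0 : Int)).set 0 1) =
      (List.range' 0 (m + 1)).map (pvS t) ++ List.replicate (t.length - m) 0 := by
  intro m
  induction m with
  | zero =>
    intro _
    rw [List.range'_succ]
    cases t <;> simp [pvS, List.replicate_succ]
  | succ m ih =>
    intro hm
    have hm' : m ≤ t.length := by omega
    rw [List.range'_concat, List.foldl_append, ih hm']
    simp only [List.foldl_cons, List.foldl_nil, Nat.one_mul, Nat.add_comm 1 m]
    rw [inner_prod t (m + 1) hm]
    have hidx : (((m + 1 : Nat) : Int)) - 1 = ((m : Nat) : Int) := by push_cast; ring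
    rw [hidx, PySem.List.pyGet?_natCast, prefix_get t m]
    have hrep : List.replicate (t.length - m) (0 : Int) =
        0 :: List.replicate (t.length - (m + 1)) 0 := by
      have h2 : t.length - m = (t.length - (m + 1)) + 1 := by omega
      rw [h2, List.replicate_succ]
    rw [hrep]
    have hlen : (m + 1) = ((List.range' 0 (m + 1)).map (pvS t)).length := by simp
    rw [set_at_prefix _ _ _ _ _ hlen]
    have hv : pvS t m + pvP t (m + 1) = pvS t (m + 1) := rfl
    simp only [Option.getD_some, hv]
    have e2 : List.range' 0 (m + 1 + 1) = List.range' 0 m ++ [m, m + 1] := by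
      rw [List.range'_concat, List.range'_concat]
      simp
    rw [e2, List.range'_concat]
    simp

-- ===== VERDICT (by name: the statement is the Claim_ definition above) =====
theorem get_tidx_spec : Claim_equal_get_tidx := by
  intro t _
  unfold Spec_get_tidx get_tidx
  rw [A_inv t t.length (le_refl _), alt_eq_map]
  simp
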